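-- pv_equiv track=rewrite | github.com/sigeauk/tide | app/elastic_helper.py | _split_esql_pipes
-- ===== SOURCE A (Python) =====
-- def _split_esql_pipes(query: str):
--     """Split an ES|QL query on top-level ``|`` characters, ignoring any pipes
--     inside quoted string literals. Returns the list of stage strings (stripped,
--     empties dropped)."""
--     if not query:
--         return []
--     stages = []
--     buf = []
--     in_str = None
--     i = 0
--     n = len(query)
--     while i < n:
--         ch = query[i]
--         if in_str:
--             buf.append(ch)
--             if ch == '\\' and i + 1 < n:
--                 buf.append(query[i + 1])
--                 i += 2
--                 continue
--             if ch == in_str: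
--                 in_str = None
--         elif ch in ('"', "'"):
--             in_str = ch
--             buf.append(ch)
--         elif ch == '|':
--             stages.append(''.join(buf).strip())
--             buf = []
--         else:
--             buf.append(ch)
--         i += 1
--     if buf:
--         stages.append(''.join(buf).strip())
--     return [s for s in stages if s]
-- ===== SOURCE B (Python) =====
-- def _split_esql_pipes(query: str):
--     """Split an ES|QL query on top-level ``|`` characters, ignoring any pipes
--     inside quoted string literals. Two passes: record the indices of the
--     top-level pipes, then slice the query at those boundaries."""
--     if not query:
--         return []
--     cuts = []
--     in_str = None
--     i = 0
--     n = len(query)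
--     while i < n:
--         ch = query[i]
--         if in_str:
--             if ch == '\\' and i + 1 < n:
--                 i += 2
--                 continue
--             if ch == in_str:
--                 in_str = None
--         elif ch in ('"', "'"):
--             in_str = ch
--         elif ch == '|':
--             cuts.append(i)
--         i += 1
--     starts = [0] + [c + 1 for c in cuts]
--     ends = cuts + [n]
--     stages = [query[s:e].strip() for s, e in zip(starts, ends)]
--     return [s for s in stages if s]
-- ===== Notes on version B (the rewrite author's own statement) =====
-- stated objective: alternative
-- what changed: B makes one scan that only records the indices of top-level unquoted pipes (no character buffer), then builds the stages in a second pass by slicing the query at those boundaries, stripping and dropping empties; A accumulates a character buffer during a single scan.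
import Mathlib
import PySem

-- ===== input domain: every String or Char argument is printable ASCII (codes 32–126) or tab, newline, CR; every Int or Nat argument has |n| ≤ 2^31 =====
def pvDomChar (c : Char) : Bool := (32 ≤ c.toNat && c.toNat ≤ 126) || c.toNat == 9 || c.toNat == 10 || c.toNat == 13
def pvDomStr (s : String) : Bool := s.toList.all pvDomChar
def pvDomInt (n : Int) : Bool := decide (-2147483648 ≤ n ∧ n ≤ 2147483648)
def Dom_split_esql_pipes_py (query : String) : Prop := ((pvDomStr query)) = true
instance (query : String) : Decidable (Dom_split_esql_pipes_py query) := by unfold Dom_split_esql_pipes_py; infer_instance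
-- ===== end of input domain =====

-- B records the cut indices in one scan and slices the query in a second pass, instead of
-- accumulating a character buffer (alternative decomposition, same O(n) cost).

-- ===== PORT A =====
-- A's while-loop over the index, ported as structural recursion on the remaining characters:
-- query[i] is the head, query[i+1] the head of the tail; state (in_str, buf) carried along.
def pvAloop : List Char → Option Char → List Char → List String
  | [], _, buf =>
      -- after the loop: 'if buf: stages.append("".join(buf).strip())'
      if buf.isEmpty then [] else [PySem.Str.strip (String.ofList buf)]
  | c :: d :: rest', some q, buf =>
      if c = '\\' then pvAloop rest' (some q) (buf ++ [c, d])   -- escape: consume two chars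
      else pvAloop (d :: rest') (if c = q then none else some q) (buf ++ [c])
  | [c], some q, buf => pvAloop [] (if c = q then none else some q) (buf ++ [c])  -- i+1 = n: no escape possible
  | c :: rest, none, buf =>
      if c = '"' ∨ c = '\'' then pvAloop rest (some c) (buf ++ [c])
      else if c = '|' then PySem.Str.strip (String.ofList buf) :: pvAloop rest none []
      else pvAloop rest none (buf ++ [c])

def split_esql_pipes_py (query : String) : List String :=
  if query = "" then []   -- 'if not query: return []'
  else (pvAloop query.toList none []).filter (fun s => !(s == ""))  -- '[s for s in stages if s]'

-- ===== PORT B =====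
-- B's first pass: the indices of top-level unquoted '|' characters, from position i onward.
def pvBcuts (L : List Char) (i : Nat) (instr : Option Char) : List Nat :=
  if h : i < L.length then
    let c := L[i]
    match instr with
    | some q =>
        if c = '\\' ∧ i + 1 < L.length then pvBcuts L (i + 2) (some q)
        else pvBcuts L (i + 1) (if c = q then none else some q)
    | none =>
        if c = '"' ∨ c = '\'' then pvBcuts L (i + 1) (some c)
        else if c = '|' then i :: pvBcuts L (i + 1) none
        else pvBcuts L (i + 1) none
  else []
termination_by L.length - i

def split_esql_pipes_py_alt (query : String) : List String :=
  if query = "" then []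
  else
    let L := query.toList
    let cuts := pvBcuts L 0 none
    let starts := 0 :: cuts.map (· + 1)
    let ends := cuts ++ [L.length]
    -- query[s:e] with 0 ≤ s ≤ e ≤ n is exactly (drop s).take (e - s) (PySem.List.slice_natCast)
    let stages := (starts.zip ends).map
      (fun p => PySem.Str.strip (String.ofList ((L.drop p.1).take (p.2 - p.1))))
    stages.filter (fun s => !(s == ""))

-- ===== PRECONDITION & SPEC =====
def Spec_split_esql_pipes_py (query : String) (out : List String) : Prop := out = split_esql_pipes_py_alt query
instance (query : String) (out : List String) : Decidable (Spec_split_esql_pipes_py query out) := by unfold Spec_split_esql_pipes_py; infer_instance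

-- ===== CLAIM (what is proved, stated in full; the proofs are below) =====
def Claim_equal_split_esql_pipes_py : Prop := ∀ (query : String), Dom_split_esql_pipes_py query → Spec_split_esql_pipes_py query (split_esql_pipes_py query)

-- ===== LEMMAS AND PROOFS =====

-- Common characterisation: the raw segments (first segment, later segments) of the remaining
-- characters under quote state `instr`, same state machine as both ports.
def pvSegs : List Char → Option Char → List Char × List (List Char)
  | [], _ => ([], [])
  | c :: d :: rest', some q =>
      if c = '\\' then
        let p := pvSegs rest' (some q); (c :: d :: p.1, p.2)
      else
        let p := pvSegs (d :: rest') (if c = q then none else some q); (c :: p.1, p.2)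
  | [c], some q =>
      let p := pvSegs [] (if c = q then none else some q); (c :: p.1, p.2)
  | c :: rest, none =>
      if c = '"' ∨ c = '\'' then
        let p := pvSegs rest (some c); (c :: p.1, p.2)
      else if c = '|' then
        let p := pvSegs rest none; ([], p.1 :: p.2)
      else
        let p := pvSegs rest none; (c :: p.1, p.2)

def pvSt (l : List Char) : String := PySem.Str.strip (String.ofList l)

def pvP : String → Bool := fun s => !(s == "")

lemma pvSt_nil : pvSt [] = "" := by decide

-- A's loop, filtered, equals the stripped segments (with buf prefixed to the first), filtered.
lemma pvA_segs : ∀ (rest : List Char) (instr : Option Char) (buf : List Char),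
    (pvAloop rest instr buf).filter pvP
      = (pvSt (buf ++ (pvSegs rest instr).1) :: (pvSegs rest instr).2.map pvSt).filter pvP := by
  intro rest instr buf
  fun_induction pvAloop rest instr buf with
  | case1 instr buf h =>
      have hb : buf = [] := by simpa using h
      subst hb; simp [pvSegs, pvSt_nil, pvP]
  | case2 instr buf h =>
      simp [pvSegs, pvSt]
  | case3 d rest' q buf ih =>
      simp [pvSegs, ih]
  | case4 c d rest' q buf h ih =>
      simp [pvSegs, h, ih]
  | case5 c q buf ih =>
      simp [pvSegs, ih]
  | case6 c rest buf h ih =>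
      simp [pvSegs, h, ih]
  | case7 rest buf h ih =>
      simp [pvSegs, List.filter_cons, ih, pvSt, pvP]
  | case8 c rest buf h h2 ih =>
      simp [pvSegs, h, h2, ih]

-- take one more character: query[start:i+1] = query[start:i] ++ [query[i]]
lemma pvSliceSnoc (L : List Char) (start i : Nat) (hsi : start ≤ i) (hi : i < L.length) :
    (L.drop start).take (i - start + 1) = (L.drop start).take (i - start) ++ [L[i]] := by
  rw [List.take_add_one]
  have h1 : i - start < (L.drop start).length := by simp [List.length_drop]; omega
  have h2 : (L.drop start)[i - start]? = some L[i] := by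
    rw [List.getElem?_eq_getElem h1]
    congr 1
    rw [List.getElem_drop]
    congr 1
    omega
  simp [h2]

lemma pvDropCons (L : List Char) (i : Nat) (hi : i < L.length) :
    L.drop i = L[i] :: L.drop (i + 1) := List.drop_eq_getElem_cons hi

-- B's second pass (slice at the cut boundaries, strip) equals the stripped segments.
lemma pvB_segs (L : List Char) : ∀ (i : Nat) (instr : Option Char) (start : Nat),
    start ≤ i → i ≤ L.length →
    ((start :: (pvBcuts L i instr).map (· + 1)).zip ((pvBcuts L i instr) ++ [L.length])).map
        (fun p => pvSt ((L.drop p.1).take (p.2 - p.1)))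
      = pvSt ((L.drop start).take (i - start) ++ (pvSegs (L.drop i) instr).1)
          :: (pvSegs (L.drop i) instr).2.map pvSt := by
  intro i instr start
  fun_induction pvBcuts L i instr generalizing start with
  | case1 i h c q hc ih =>
      -- escape: consume two characters
      intro hsi hin
      have hi : i < L.length := h
      have hi1 : i + 1 < L.length := hc.2
      have hce : L[i] = '\\' := hc.1
      rw [ih start (by omega) (by omega)]
      rw [pvDropCons L i hi, pvDropCons L (i + 1) hi1]
      simp only [pvSegs, hce]
      have e1 : (L.drop start).take (i + 2 - start)
          = (L.drop start).take (i - start) ++ [L[i], L[i + 1]] := by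
        have t1 := pvSliceSnoc L start i hsi hi
        have t2 := pvSliceSnoc L start (i + 1) (by omega) hi1
        have e : i + 1 - start = i - start + 1 := by omega
        have e' : i + 2 - start = i + 1 - start + 1 := by omega
        rw [e', t2, e, t1]; simp
      rw [e1]
      simp [hce]
  | case2 i h c q hc ih =>
      intro hsi hin
      have hi : i < L.length := h
      simp only [dite_eq_ite] at ih
      rw [ih start (by omega) (by omega)]
      rw [pvDropCons L i hi]
      have e1 : (L.drop start).take (i + 1 - start)
          = (L.drop start).take (i - start) ++ [L[i]] := by
        have e : i + 1 - start = i - start + 1 := by omega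
        rw [e]; exact pvSliceSnoc L start i hsi hi
      by_cases hr : i + 1 < L.length
      · -- rest nonempty: c ≠ '\\' (else the escape branch would have fired)
        have hcne : L[i] ≠ '\\' := fun hb => hc ⟨hb, hr⟩
        rw [pvDropCons L (i + 1) hr]
        simp only [pvSegs, hcne, if_false, e1]
        simp [← pvDropCons L (i + 1) hr]
        exact ⟨rfl, rfl⟩
      · have hdrop : L.drop (i + 1) = [] := List.drop_eq_nil_of_le (by omega)
        rw [hdrop]
        simp only [pvSegs, e1]
        simp
  | case3 i h c hc ih =>
      intro hsi hin
      have hi : i < L.length := h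
      have hc' : L[i] = '"' ∨ L[i] = '\'' := hc
      rw [ih start (by omega) (by omega)]
      rw [pvDropCons L i hi]
      simp only [pvSegs, hc', if_true]
      have e1 : (L.drop start).take (i + 1 - start)
          = (L.drop start).take (i - start) ++ [L[i]] := by
        have e : i + 1 - start = i - start + 1 := by omega
        rw [e]; exact pvSliceSnoc L start i hsi hi
      rw [e1]; simp
      try exact ⟨rfl, rfl⟩
  | case4 i h c hc hp ih =>
      intro hsi hin
      have hi : i < L.length := h
      have hc' : ¬(L[i] = '"' ∨ L[i] = '\'') := hc
      have hp' : L[i] = '|' := hp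
      rw [pvDropCons L i hi]
      have hq : ¬('|' = '"' ∨ '|' = '\'') := by decide
      simp only [pvSegs, hp', hq, if_true, if_false, List.cons_append, List.zip_cons_cons, List.map_cons]
      rw [ih (i + 1) (by omega) (by omega)]
      simp
  | case5 i h c hc hp ih =>
      intro hsi hin
      have hi : i < L.length := h
      have hc' : ¬(L[i] = '"' ∨ L[i] = '\'') := hc
      have hp' : ¬(L[i] = '|') := hp
      rw [ih start (by omega) (by omega)]
      rw [pvDropCons L i hi]
      simp only [pvSegs, hc', hp', if_false]
      have e1 : (L.drop start).take (i + 1 - start)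
          = (L.drop start).take (i - start) ++ [L[i]] := by
        have e : i + 1 - start = i - start + 1 := by omega
        rw [e]; exact pvSliceSnoc L start i hsi hi
      rw [e1]; simp
  | case6 i h =>
      intro hsi hin
      have hie : i = L.length := by omega
      subst hie
      simp [pvSegs, List.drop_length]

-- ===== VERDICT (by name: the statement is the Claim_ definition above) =====
theorem split_esql_pipes_py_spec : Claim_equal_split_esql_pipes_py := by
  intro query _
  unfold Spec_split_esql_pipes_py split_esql_pipes_py split_esql_pipes_py_alt
  by_cases h : query = ""
  · simp [h]
  · simp only [h, if_false]
    have hA := pvA_segs query.toList none []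
    have hB := pvB_segs query.toList 0 none 0 (le_refl 0) (Nat.zero_le _)
    show List.filter pvP (pvAloop query.toList none [])
      = List.filter pvP
          (((0 :: (pvBcuts query.toList 0 none).map (· + 1)).zip
              ((pvBcuts query.toList 0 none) ++ [query.toList.length])).map
            (fun p => pvSt ((query.toList.drop p.1).take (p.2 - p.1))))
    rw [hA, hB]
    simp
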